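-- pv_equiv track=rewrite | github.com/wangxin688/zabbix-network-device-template | zabbix_CBQOS_Creat_items_data.py | finalwithPMCM
-- ===== SOURCE A (Python) =====
-- def finalwithPMCM(finallist, PMCM):
--             tmp = finallist
--             for i in range(len(tmp)):
--                 for e in range(len(tmp[i])):
--                     for k in range(len(PMCM)):
--                         if (tmp[i][e][0] == PMCM[k][0]) & (tmp[i][e][1] == PMCM[k][1]):
--                             tmp[i][e].append(PMCM[k][3])
--             return tmp
-- ===== SOURCE B (Python) =====
-- def finalwithPMCM(finallist, PMCM):
--     # Hash join: group PMCM values by (col0,col1) once, then one pass over the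
--     # elements appends each element's whole suffix (mutates finallist in place, like A).
--     if not PMCM:
--         return finallist
--     suffix = {}
--     for p in PMCM:
--         if len(p) > 3:
--             suffix.setdefault((p[0], p[1]), []).append(p[3])
--     for row in finallist:
--         for el in row:
--             el.extend(suffix.get((el[0], el[1]), []))
--     return finallist
-- ===== Notes on version B (the rewrite author's own statement) =====
-- stated objective: faster
-- what changed: Replaces the nested element-by-PMCM scan with a hash join: one pass groups PMCM values by (col0,col1) key in a dict, then one pass over the elements extends each element with its whole matching suffix.
-- crash fix: When both finallist holds an element and PMCM is nonempty and some element or PMCM row has fewer than 2 entries, or a matching PMCM row has fewer than 4, A raises IndexError; where B's key lookups are still possible (all elements have 2 entries) B returns finallist with the complete matches appended and the short PMCM rows skipped. — e.g. on finalwithPMCM([[["a", "b"]]], [["a"]]): A raises IndexError, B returns [[["a", "b"]]]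
import Mathlib
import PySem

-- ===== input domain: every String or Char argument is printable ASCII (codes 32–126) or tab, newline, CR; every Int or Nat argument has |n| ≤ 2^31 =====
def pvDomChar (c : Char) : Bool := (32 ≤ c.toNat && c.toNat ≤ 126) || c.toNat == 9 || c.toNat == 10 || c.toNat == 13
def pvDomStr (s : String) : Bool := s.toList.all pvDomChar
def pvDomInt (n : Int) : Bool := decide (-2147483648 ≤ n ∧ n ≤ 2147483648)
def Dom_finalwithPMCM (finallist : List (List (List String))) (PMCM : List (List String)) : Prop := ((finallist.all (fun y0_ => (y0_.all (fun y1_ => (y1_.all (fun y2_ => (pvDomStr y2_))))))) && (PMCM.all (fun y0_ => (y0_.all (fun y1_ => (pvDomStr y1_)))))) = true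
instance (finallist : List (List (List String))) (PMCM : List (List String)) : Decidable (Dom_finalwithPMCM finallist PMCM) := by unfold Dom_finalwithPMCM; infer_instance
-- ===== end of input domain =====

-- B replaces A's nested element-by-PMCM scan with a hash join (group PMCM values by key once, then
-- one pass over the elements); equivalence is about the RETURN value — the Python A mutates
-- finallist's inner lists in place, and the Python B performs the same in-place mutation.

-- ===== PORT A =====
-- the Bool test `(tmp[i][e][0] == PMCM[k][0]) & (tmp[i][e][1] == PMCM[k][1])`
def pvMatch (el p : List String) : Bool :=
  (PySem.List.pyGetD el 0 "" == PySem.List.pyGetD p 0 "") &&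
  (PySem.List.pyGetD el 1 "" == PySem.List.pyGetD p 1 "")

-- loop body `if …: tmp[i][e].append(PMCM[k][3])`; the in-place append is rendered as replacing
-- position (i,e); i,e come from `range`, hence are non-negative
def pvStepA (i e : Int) (t : List (List (List String))) (p : List String) : List (List (List String)) :=
  if pvMatch (PySem.List.pyGetD (PySem.List.pyGetD t i []) e []) p then
    t.set i.toNat ((PySem.List.pyGetD t i []).set e.toNat
      (PySem.List.pyGetD (PySem.List.pyGetD t i []) e [] ++ [PySem.List.pyGetD p 3 ""]))
  else t

def finalwithPMCM (finallist : List (List (List String))) (PMCM : List (List String)) : List (List (List String)) :=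
  (PySem.List.pyRange 0 (finallist.length : Int) 1).foldl (fun t i =>
    (PySem.List.pyRange 0 ((PySem.List.pyGetD t i []).length : Int) 1).foldl (fun t e =>
      (PySem.List.pyRange 0 (PMCM.length : Int) 1).foldl (fun t k =>
        pvStepA i e t (PySem.List.pyGetD PMCM k [])) t) t) finallist

-- ===== PORT B =====
def pvKey (l : List String) : String × String :=
  (PySem.List.pyGetD l 0 "", PySem.List.pyGetD l 1 "")

def finalwithPMCM_alt (finallist : List (List (List String))) (PMCM : List (List String)) : List (List (List String)) :=
  if PMCM = [] then finallist
  else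
    let suffix : PySem.Dict (String × String) (List String) :=
      PMCM.foldl (fun d p =>
        if 3 < p.length then d.modify (pvKey p) [] (fun v => v ++ [PySem.List.pyGetD p 3 ""]) else d)
        PySem.Dict.empty
    finallist.map (fun row => row.map (fun el => el ++ suffix.getD (pvKey el) []))

-- ===== PRECONDITION & SPEC =====
-- Pre_ excludes exactly the inputs on which A raises IndexError: when an element and a PMCM row
-- both exist, every element and PMCM row must have at least 2 entries and every matching PMCM row
-- at least 4 (A reads el[0], el[1], p[0], p[1] for every pair and p[3] on every match).
def Pre_finalwithPMCM (finallist : List (List (List String))) (PMCM : List (List String)) : Prop :=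
  ((∃ row ∈ finallist, row ≠ []) ∧ PMCM ≠ []) →
    (∀ row ∈ finallist, ∀ el ∈ row, 2 ≤ el.length) ∧
    (∀ p ∈ PMCM, 2 ≤ p.length) ∧
    (∀ row ∈ finallist, ∀ el ∈ row, ∀ p ∈ PMCM, pvMatch el p = true → 4 ≤ p.length)

instance (finallist : List (List (List String))) (PMCM : List (List String)) : Decidable (Pre_finalwithPMCM finallist PMCM) := by
  unfold Pre_finalwithPMCM; infer_instance

def pvWitness_finalwithPMCM : List (List (List String)) × List (List String) :=
  ([[["a", "b"]], [["a", "c"]]], [["a", "b", "x", "v1"], ["a", "b", "y", "v2"]])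

-- When every element has its 2 key entries but some PMCM row is shorter than 2 (A reads p[0],p[1]
-- for every pair) or a matching PMCM row lacks a 4th entry, A raises IndexError; B returns
-- finallist with the complete matches appended and those short PMCM rows skipped.
def Raises_finalwithPMCM (finallist : List (List (List String))) (PMCM : List (List String)) : Prop :=
  (∃ row ∈ finallist, row ≠ []) ∧ PMCM ≠ [] ∧
  (∀ row ∈ finallist, ∀ el ∈ row, 2 ≤ el.length) ∧
  ((∃ p ∈ PMCM, p.length < 2) ∨
   (∃ row ∈ finallist, ∃ el ∈ row, ∃ p ∈ PMCM, pvMatch el p = true ∧ p.length < 4))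

instance (finallist : List (List (List String))) (PMCM : List (List String)) : Decidable (Raises_finalwithPMCM finallist PMCM) := by
  unfold Raises_finalwithPMCM; infer_instance

def pvRaiseWitness_finalwithPMCM : List (List (List String)) × List (List String) :=
  ([[["a", "b"]]], [["a"]])

def pvRaiseWitnessOut_finalwithPMCM : List (List (List String)) := [[["a", "b"]]]

def Spec_finalwithPMCM (finallist : List (List (List String))) (PMCM : List (List String)) (out : List (List (List String))) : Prop := out = finalwithPMCM_alt finallist PMCM
instance (finallist : List (List (List String))) (PMCM : List (List String)) (out : List (List (List String))) : Decidable (Spec_finalwithPMCM finallist PMCM out) := by unfold Spec_finalwithPMCM; infer_instance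

-- ===== CLAIM (what is proved, stated in full; the proofs are below) =====
def Claim_equal_finalwithPMCM : Prop := ∀ (finallist : List (List (List String))) (PMCM : List (List String)), Dom_finalwithPMCM finallist PMCM → Pre_finalwithPMCM finallist PMCM → Spec_finalwithPMCM finallist PMCM (finalwithPMCM finallist PMCM)

def Claim_raises_finalwithPMCM : Prop := (∀ (finallist : List (List (List String))) (PMCM : List (List String)), Dom_finalwithPMCM finallist PMCM → Raises_finalwithPMCM finallist PMCM → ¬ Pre_finalwithPMCM finallist PMCM) ∧ (Dom_finalwithPMCM (pvRaiseWitness_finalwithPMCM.1) (pvRaiseWitness_finalwithPMCM.2) ∧ Raises_finalwithPMCM (pvRaiseWitness_finalwithPMCM.1) (pvRaiseWitness_finalwithPMCM.2) ∧ finalwithPMCM_alt (pvRaiseWitness_finalwithPMCM.1) (pvRaiseWitness_finalwithPMCM.2) = pvRaiseWitnessOut_finalwithPMCM)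

-- ===== LEMMAS AND PROOFS =====

-- the per-element suffix A appends: the values of the PMCM rows matching the element's key
def pvSfx (ks : List (List String)) (el : List String) : List String :=
  (ks.filter (fun p => pvMatch el p)).map (fun p => PySem.List.pyGetD p 3 "")

def pvF (PMCM : List (List String)) (el : List String) : List String := el ++ pvSfx PMCM el

lemma pvMatch_append (el s p : List String) (h2 : 2 ≤ el.length) :
    pvMatch (el ++ s) p = pvMatch el p := by
  have l0 : (0 : Int) < ((el ++ s).length : Int) := by simp [List.length_append]; omega
  have l0' : (0 : Int) < (el.length : Int) := by omega
  have l1 : (1 : Int) < ((el ++ s).length : Int) := by simp [List.length_append]; omega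
  have l1' : (1 : Int) < (el.length : Int) := by omega
  unfold pvMatch
  rw [PySem.List.pyGetD_eq_getElem (i := (0 : Int)) (el ++ s) "" (by norm_num) l0,
      PySem.List.pyGetD_eq_getElem (i := (0 : Int)) el "" (by norm_num) l0',
      PySem.List.pyGetD_eq_getElem (i := (1 : Int)) (el ++ s) "" (by norm_num) l1,
      PySem.List.pyGetD_eq_getElem (i := (1 : Int)) el "" (by norm_num) l1']
  simp only [Int.toNat_zero, Int.toNat_one]
  rw [List.getElem_append_left (by omega), List.getElem_append_left (by omega)]

lemma foldA_inner (i e : Nat) (el : List String) (h2 : 2 ≤ el.length) :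
    ∀ (ks : List (List String)) (s : List String) (tmp : List (List (List String)))
      (hi : i < tmp.length) (he : e < (tmp[i]'hi).length)
      (_ : (tmp[i]'hi)[e]'he = el ++ s),
    ks.foldl (pvStepA (i : Int) (e : Int)) tmp
      = tmp.set i ((tmp[i]'hi).set e (el ++ s ++ pvSfx ks el)) := by
  intro ks
  induction ks with
  | nil =>
    intro s tmp hi he hv
    simp only [List.foldl_nil, pvSfx, List.filter_nil, List.map_nil, List.append_nil, ← hv]
    rw [List.set_getElem_self he, List.set_getElem_self hi]
  | cons p ks ih =>
    intro s tmp hi he hv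
    have hel : PySem.List.pyGetD (PySem.List.pyGetD tmp (i : Int) []) (e : Int) [] = el ++ s := by
      simp only [PySem.List.pyGetD_natCast]
      rw [List.getD_eq_getElem _ _ hi, List.getD_eq_getElem _ _ he, hv]
    simp only [List.foldl_cons]
    by_cases hm : pvMatch el p = true
    · have hstep : pvStepA (i : Int) (e : Int) tmp p
          = tmp.set i ((tmp[i]'hi).set e (el ++ (s ++ [PySem.List.pyGetD p 3 ""]))) := by
        unfold pvStepA
        rw [hel, pvMatch_append _ _ _ h2, if_pos hm,
            PySem.List.pyGetD_natCast, List.getD_eq_getElem _ _ hi]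
        simp [List.append_assoc]
      rw [hstep]
      have hi' : i < (tmp.set i ((tmp[i]'hi).set e (el ++ (s ++ [PySem.List.pyGetD p 3 ""])))).length := by
        simpa using hi
      have he' : e < ((tmp.set i ((tmp[i]'hi).set e (el ++ (s ++ [PySem.List.pyGetD p 3 ""]))))[i]'hi').length := by
        simp only [List.getElem_set_self, List.length_set]
        exact he
      have hv' : ((tmp.set i ((tmp[i]'hi).set e (el ++ (s ++ [PySem.List.pyGetD p 3 ""]))))[i]'hi')[e]'he'
          = el ++ (s ++ [PySem.List.pyGetD p 3 ""]) := by
        simp only [List.getElem_set_self]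
      rw [ih (s ++ [PySem.List.pyGetD p 3 ""]) _ hi' he' hv']
      simp only [List.getElem_set_self, List.set_set]
      simp [pvSfx, hm, List.append_assoc]
    · have hstep : pvStepA (i : Int) (e : Int) tmp p = tmp := by
        unfold pvStepA
        rw [hel, pvMatch_append _ _ _ h2, if_neg (by simp [hm])]
      rw [hstep, ih s tmp hi he hv]
      simp [pvSfx, hm]

lemma foldA_middle (PMCM : List (List String)) (i : Nat) (row : List (List String))
    (h2 : ∀ el ∈ row, 2 ≤ el.length) :
    ∀ (n j : Nat), n = row.length - j → ∀ (tmp : List (List (List String)))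
      (hi : i < tmp.length), tmp[i]'hi = (row.take j).map (pvF PMCM) ++ row.drop j →
    (PySem.List.pyRange (j : Int) (row.length : Int) 1).foldl
      (fun t e => (PySem.List.pyRange 0 (PMCM.length : Int) 1).foldl
        (fun t k => pvStepA (i : Int) e t (PySem.List.pyGetD PMCM k [])) t) tmp
      = tmp.set i (row.map (pvF PMCM)) := by
  intro n
  induction n with
  | zero =>
    intro j hn tmp hi hpre
    have hj : row.length ≤ j := by omega
    have hr : PySem.List.pyRange (j : Int) (row.length : Int) 1 = [] := by
      rw [List.eq_nil_iff_forall_not_mem]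
      intro x hx
      rw [PySem.List.mem_pyRange_one] at hx
      omega
    rw [hr, List.foldl_nil]
    rw [List.take_of_length_le hj, List.drop_of_length_le hj, List.append_nil] at hpre
    rw [← hpre, List.set_getElem_self hi]
  | succ n ih =>
    intro j hn tmp hi hpre
    have hj : j < row.length := by omega
    rw [PySem.List.pyRange_one_cons (a := (j : Int)) (b := (row.length : Int)) (by exact_mod_cast hj), List.foldl_cons]
    have hlen : (tmp[i]'hi).length = row.length := by
      simp only [hpre, List.length_append, List.length_map, List.length_take, List.length_drop]
      omega
    have heb : j < (tmp[i]'hi).length := by omega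
    have htake : ((row.take j).map (pvF PMCM)).length = j := by
      simp [List.length_map, List.length_take]; omega
    have hv : (tmp[i]'hi)[j]'heb = (row[j]'hj) ++ [] := by
      rw [List.append_nil]
      simp only [hpre]
      rw [List.getElem_append_right (by simp)]
      simp only [List.getElem_drop]
      congr 1
      simp
      omega
    have hinner : ∀ t : List (List (List String)),
        (PySem.List.pyRange 0 (PMCM.length : Int) 1).foldl
          (fun t k => pvStepA (i : Int) (j : Int) t (PySem.List.pyGetD PMCM k [])) t
        = PMCM.foldl (pvStepA (i : Int) (j : Int)) t := by
      intro t
      have h := PySem.List.foldl_pyRange_pyGetD' PMCM [] (pvStepA (i : Int) (j : Int)) t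
        (a := 0) (by norm_num)
      simpa using h
    have h2j : 2 ≤ (row[j]'hj).length := h2 _ (List.getElem_mem hj)
    rw [hinner, foldA_inner i j (row[j]'hj) h2j PMCM [] tmp hi heb hv]
    have hcast : ((j : Int) + 1) = (((j + 1 : Nat)) : Int) := by push_cast; ring
    rw [hcast]
    have hi' : i < (tmp.set i ((tmp[i]'hi).set j ((row[j]'hj) ++ [] ++ pvSfx PMCM (row[j]'hj)))).length := by
      simpa using hi
    have hpre' : (tmp.set i ((tmp[i]'hi).set j ((row[j]'hj) ++ [] ++ pvSfx PMCM (row[j]'hj))))[i]'hi'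
        = (row.take (j + 1)).map (pvF PMCM) ++ row.drop (j + 1) := by
      simp only [List.getElem_set_self]
      simp only [hpre]
      rw [List.drop_eq_getElem_cons hj, List.set_append, if_neg (by omega)]
      rw [htake, Nat.sub_self, List.set_cons_zero]
      rw [List.take_add_one, List.getElem?_eq_getElem hj]
      simp only [List.map_append, List.map_take]
      simp [pvF, List.append_assoc]
    rw [ih (j + 1) (by omega) _ hi' hpre']
    simp only [List.set_set]

lemma foldA_outer (PMCM : List (List String)) (FL : List (List (List String)))
    (h2 : ∀ row ∈ FL, ∀ el ∈ row, 2 ≤ el.length) :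
    ∀ (n m : Nat), n = FL.length - m → ∀ (tmp : List (List (List String))),
      tmp = (FL.take m).map (fun row => row.map (pvF PMCM)) ++ FL.drop m →
    (PySem.List.pyRange (m : Int) (FL.length : Int) 1).foldl
      (fun t i => (PySem.List.pyRange 0 ((PySem.List.pyGetD t i []).length : Int) 1).foldl
        (fun t e => (PySem.List.pyRange 0 (PMCM.length : Int) 1).foldl
          (fun t k => pvStepA i e t (PySem.List.pyGetD PMCM k [])) t) t) tmp
      = FL.map (fun row => row.map (pvF PMCM)) := by
  intro n
  induction n with
  | zero =>
    intro m hn tmp hpre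
    have hm : FL.length ≤ m := by omega
    have hr : PySem.List.pyRange (m : Int) (FL.length : Int) 1 = [] := by
      rw [List.eq_nil_iff_forall_not_mem]
      intro x hx
      rw [PySem.List.mem_pyRange_one] at hx
      omega
    rw [hr, List.foldl_nil, hpre, List.take_of_length_le hm, List.drop_of_length_le hm,
        List.append_nil]
  | succ n ih =>
    intro m hn tmp hpre
    have hm : m < FL.length := by omega
    rw [PySem.List.pyRange_one_cons (a := (m : Int)) (b := (FL.length : Int)) (by exact_mod_cast hm), List.foldl_cons]
    have hlen : tmp.length = FL.length := by
      simp only [hpre, List.length_append, List.length_map, List.length_take, List.length_drop]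
      omega
    have him : m < tmp.length := by omega
    have htake : ((FL.take m).map (fun row => row.map (pvF PMCM))).length = m := by
      simp [List.length_map, List.length_take]; omega
    have hgm : PySem.List.pyGetD tmp (m : Int) [] = FL[m]'hm := by
      rw [PySem.List.pyGetD_natCast, List.getD_eq_getElem _ _ him]
      simp only [hpre]
      rw [List.getElem_append_right (by simp)]
      simp only [List.getElem_drop]
      congr 1
      simp
      omega
    rw [hgm]
    have htm : tmp[m]'him = FL[m]'hm := by
      rw [← hgm, PySem.List.pyGetD_natCast, List.getD_eq_getElem _ _ him]
    have hmid := foldA_middle PMCM m (FL[m]'hm) (h2 _ (List.getElem_mem hm))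
      (FL[m]'hm).length 0 (by omega) tmp him (by simpa using htm)
    rw [Nat.cast_zero] at hmid
    rw [hmid]
    have hcast : ((m : Int) + 1) = (((m + 1 : Nat)) : Int) := by push_cast; ring
    rw [hcast]
    have hpre' : tmp.set m ((FL[m]'hm).map (pvF PMCM))
        = (FL.take (m + 1)).map (fun row => row.map (pvF PMCM)) ++ FL.drop (m + 1) := by
      simp only [hpre]
      rw [List.drop_eq_getElem_cons hm, List.set_append, if_neg (by omega)]
      rw [htake, Nat.sub_self, List.set_cons_zero]
      rw [List.take_add_one, List.getElem?_eq_getElem hm]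
      simp only [List.map_append, List.map_take]
      simp [List.append_assoc]
    rw [ih (m + 1) (by omega) _ hpre']

lemma A_canonical (FL : List (List (List String))) (PMCM : List (List String))
    (h2 : ∀ row ∈ FL, ∀ el ∈ row, 2 ≤ el.length) :
    finalwithPMCM FL PMCM = FL.map (fun row => row.map (pvF PMCM)) := by
  unfold finalwithPMCM
  have h := foldA_outer PMCM FL h2 FL.length 0 (by omega) FL (by simp)
  rw [Nat.cast_zero] at h
  exact h

lemma foldl_const {α β : Type} (l : List β) (t : α) : l.foldl (fun t _ => t) t = t := by
  induction l generalizing t with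
  | nil => rfl
  | cons x xs ih => simp [List.foldl_cons, ih]

lemma A_empty_PMCM (FL : List (List (List String))) : finalwithPMCM FL [] = FL := by
  unfold finalwithPMCM
  have hr : PySem.List.pyRange 0 (([] : List (List String)).length : Int) 1 = [] := by decide
  simp only [hr, List.foldl_nil, foldl_const]

lemma alt_getD (PMCM : List (List String)) (c : String × String) :
    (PMCM.foldl (fun d p =>
        if 3 < p.length then d.modify (pvKey p) [] (fun v => v ++ [PySem.List.pyGetD p 3 ""]) else d)
        PySem.Dict.empty).getD c []
    = ((PMCM.filter (fun p => decide (3 < p.length))).filter (fun p => pvKey p == c)).map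
        (fun p => PySem.List.pyGetD p 3 "") := by
  rw [PySem.List.foldl_ite_eq_foldl_filter (fun q : List String => 3 < q.length)
      (fun (d : PySem.Dict (String × String) (List String)) (q : List String) =>
        d.modify (pvKey q) [] (fun v => v ++ [PySem.List.pyGetD q 3 ""]))]
  have hmap : (PMCM.filter (fun p => decide (3 < p.length))).foldl
      (fun d p => d.modify (pvKey p) [] (fun v => v ++ [PySem.List.pyGetD p 3 ""])) PySem.Dict.empty
      = ((PMCM.filter (fun p => decide (3 < p.length))).map
          (fun p => (pvKey p, PySem.List.pyGetD p 3 ""))).foldl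
          (fun d q => d.modify q.1 [] (fun v => v ++ [q.2])) PySem.Dict.empty := by
    rw [List.foldl_map]
  rw [hmap, PySem.Dict.getD_foldl_modify_append]
  rw [List.filter_map, List.map_map]
  simp [Function.comp_def]

lemma alt_canonical (FL : List (List (List String))) (PMCM : List (List String)) (hp : PMCM ≠ []) :
    finalwithPMCM_alt FL PMCM
    = FL.map (fun row => row.map (fun el =>
        el ++ ((PMCM.filter (fun p => decide (3 < p.length))).filter
                (fun p => pvKey p == pvKey el)).map (fun p => PySem.List.pyGetD p 3 ""))) := by
  unfold finalwithPMCM_alt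
  rw [if_neg hp]
  simp only [alt_getD]

lemma key_beq (el p : List String) : (pvKey p == pvKey el) = pvMatch el p := by
  rw [Bool.eq_iff_iff]
  simp only [pvKey, pvMatch, beq_iff_eq, Prod.mk.injEq, Bool.and_eq_true]
  constructor
  · rintro ⟨x, y⟩; exact ⟨x.symm, y.symm⟩
  · rintro ⟨x, y⟩; exact ⟨x.symm, y.symm⟩

-- ===== VERDICT (by name: the statement is the Claim_ definition above) =====
theorem finalwithPMCM_spec : Claim_equal_finalwithPMCM := by
  intro FL PMCM _ hpre
  unfold Spec_finalwithPMCM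
  by_cases hp : PMCM = []
  · subst hp
    rw [A_empty_PMCM]
    unfold finalwithPMCM_alt
    rw [if_pos rfl]
  · by_cases hne : ∃ row ∈ FL, row ≠ []
    · obtain ⟨hEl, _, hM⟩ := hpre ⟨hne, hp⟩
      rw [A_canonical FL PMCM hEl, alt_canonical FL PMCM hp]
      apply List.map_congr_left
      intro row hrow
      apply List.map_congr_left
      intro el hel
      unfold pvF pvSfx
      congr 1
      rw [List.filter_filter]
      apply congrArg
      apply List.filter_congr
      intro p hpm
      rw [key_beq]
      by_cases hm : pvMatch el p = true
      · have h4 : 3 < p.length := by have := hM row hrow el hel p hpm hm; omega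
        simp [hm, h4]
      · have hf : pvMatch el p = false := by revert hm; cases pvMatch el p <;> simp
        simp [hf]
    · have hrows : ∀ row ∈ FL, row = [] := by
        intro row hrow
        by_contra h
        exact hne ⟨row, hrow, h⟩
      rw [A_canonical FL PMCM
        (by intro row hrow el hel; rw [hrows row hrow] at hel; cases hel), alt_canonical FL PMCM hp]
      apply List.map_congr_left
      intro row hrow
      rw [hrows row hrow]
      simp

theorem finalwithPMCM_raises : Claim_raises_finalwithPMCM := by
  unfold Claim_raises_finalwithPMCM
  refine ⟨?_, by decide⟩
  intro FL PMCM _ hr hpre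
  obtain ⟨h1, h2, _, h3⟩ := hr
  obtain ⟨hEl, hP2, hM⟩ := hpre ⟨h1, h2⟩
  rcases h3 with ⟨p, hp, hlt⟩ | ⟨row, hrow, el, hel, p, hp, hm, hlt⟩
  · have := hP2 p hp; omega
  · have := hM row hrow el hel p hp hm; omega

-- self-check of the crash-fix witness: B's port returns the stated literal there (projection of finalwithPMCM_raises)
lemma pvRaiseWitnessOut_ok : finalwithPMCM_alt (pvRaiseWitness_finalwithPMCM.1) (pvRaiseWitness_finalwithPMCM.2) = pvRaiseWitnessOut_finalwithPMCM := finalwithPMCM_raises.2.2.2
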